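-- pv_equiv track=rewrite | github.com/grafana/pyroscope | tools/syft-to-pyroscope-yaml/syft_to_pyroscope_yaml.py | _extract_group_id_prefixes
-- ===== SOURCE A (Python) =====
-- from typing import Dict, List, Optional, Tuple
--
-- def _extract_group_id_prefixes(group_id: str) -> List[str]:
--     """Extract prefixes from groupId, including parent prefixes.
--
--     For example, 'org.apache.tomcat.embed' generates:
--     - 'org/apache/tomcat/embed' (full)
--     - 'org/apache/tomcat' (parent)
--     - 'org/apache' (grandparent)
--
--     This is important because Maven groupIds don't always match
--     Java package structures (e.g., tomcat-embed has packages under org.apache.tomcat.*).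
--     """
--     if not group_id:
--         return []
--
--     # Convert to prefix format
--     prefix = group_id.replace(".", "/")
--     prefixes = [prefix]
--
--     # Extract parent prefixes (go up to 2 levels)
--     parts = group_id.split(".")
--     # Generate parent prefixes: org.apache.tomcat.embed -> org.apache.tomcat, org.apache
--     for i in range(len(parts) - 1, max(0, len(parts) - 3), -1):
--         parent_group = ".".join(parts[:i])
--         parent_prefix = parent_group.replace(".", "/")
--         prefixes.append(parent_prefix)
--
--     return prefixes
-- ===== SOURCE B (Python) =====
-- def _extract_group_id_prefixes(group_id):
--     """Single forward pass: build the cumulative '/'-chain once, then take the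
--     last three entries (full prefix plus up to two parents) in reverse."""
--     if not group_id:
--         return []
--     chain = []
--     current = ""
--     for part in group_id.split("."):
--         current = part if not chain else "/".join([current, part])
--         chain.append(current)
--     return list(reversed(chain))[:3]
-- ===== Notes on version B (the rewrite author's own statement) =====
-- stated objective: simpler
-- what changed: A walks a backward index range, re-slicing the split list, re-joining each slice on dots and re-running the dot-to-slash replace per slice; B makes one forward pass that accumulates the slash-joined prefix chain incrementally and returns the last three chain entries in reverse, with no re-joining or re-replacing.
import Mathlib
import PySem

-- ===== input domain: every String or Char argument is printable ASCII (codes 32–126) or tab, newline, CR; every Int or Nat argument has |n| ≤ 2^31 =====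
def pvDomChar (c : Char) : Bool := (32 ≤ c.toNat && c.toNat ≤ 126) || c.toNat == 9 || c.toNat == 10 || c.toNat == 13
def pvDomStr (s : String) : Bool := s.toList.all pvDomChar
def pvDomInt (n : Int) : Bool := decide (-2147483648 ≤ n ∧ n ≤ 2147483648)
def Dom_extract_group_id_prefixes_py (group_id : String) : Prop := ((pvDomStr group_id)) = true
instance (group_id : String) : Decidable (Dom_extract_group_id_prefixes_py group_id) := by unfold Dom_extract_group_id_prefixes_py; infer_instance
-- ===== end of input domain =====

-- B replaces A's backward index loop (slice parts[:i], re-join with '.', replace again) by one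
-- forward pass that accumulates the '/'-joined chain once and returns its last three entries in
-- reverse; objective: simpler. Return value only; neither version mutates anything.

-- ===== PORT A =====
-- 'group_id.split(".")': sep is the nonempty literal ".", so Python never raises;
-- ported as Chars.splitOn on the code points (exact for nonempty sep), mapped back to String.
def extract_group_id_prefixes_py (group_id : String) : List String :=
  if group_id = "" then []
  else
    let prefix0 := PySem.Str.replace group_id "." "/"
    let prefixes : List String := [prefix0]
    let parts : List String := (PySem.Chars.splitOn group_id.toList ['.']).map String.ofList
    let n : Int := parts.length
    (PySem.List.pyRange (n - 1) (max 0 (n - 3)) (-1)).foldl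
      (fun acc i =>
        let parent_group := PySem.Str.join "." (PySem.List.slice parts none (some i))
        let parent_prefix := PySem.Str.replace parent_group "." "/"
        acc ++ [parent_prefix]) prefixes

def extract_group_id_prefixes_py_alt (group_id : String) : List String :=
  if group_id = "" then []
  else
    let parts : List String := (PySem.Chars.splitOn group_id.toList ['.']).map String.ofList
    let st := parts.foldl
      (fun (st : List String × String) part =>
        let cur := if st.1.isEmpty then part else PySem.Str.join "/" [st.2, part]
        (st.1 ++ [cur], cur)) ([], "")
    (st.1.reverse).take 3

-- ===== PRECONDITION & SPEC =====
def Spec_extract_group_id_prefixes_py (group_id : String) (out : List String) : Prop := out = extract_group_id_prefixes_py_alt group_id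
instance (group_id : String) (out : List String) : Decidable (Spec_extract_group_id_prefixes_py group_id out) := by unfold Spec_extract_group_id_prefixes_py; infer_instance

-- ===== CLAIM (what is proved, stated in full; the proofs are below) =====
def Claim_equal_extract_group_id_prefixes_py : Prop := ∀ (group_id : String), Dom_extract_group_id_prefixes_py group_id → Spec_extract_group_id_prefixes_py group_id (extract_group_id_prefixes_py group_id)

-- ===== LEMMAS AND PROOFS =====

-- proof-side models: pure single-char split, join with a single-char separator,
-- the char-to-char substitution done by replace, and char-level models of B's fold
def pvSplit1 : List Char → List (List Char)
  | [] => [[]]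
  | c :: t =>
    if c = '.' then [] :: pvSplit1 t
    else
      match pvSplit1 t with
      | [] => [[c]]
      | p :: ps => (c :: p) :: ps
def pvJoin (sep : Char) : List (List Char) → List Char
  | [] => []
  | p :: t => p ++ t.flatMap (fun q => sep :: q)
def pvF (c : Char) : Char := if c = '.' then '/' else c
def pvConsH (pre : List Char) : List (List Char) → List (List Char)
  | [] => [pre]
  | p :: ps => (pre ++ p) :: ps
def pvScan (cur : List Char) : List (List Char) → List (List Char)
  | [] => []
  | q :: t => (cur ++ '/' :: q) :: pvScan (cur ++ '/' :: q) t
def pvChain : List (List Char) → List (List Char)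
  | [] => []
  | p :: t => p :: pvScan p t
def pvLast (cur : List Char) : List (List Char) → List Char
  | [] => cur
  | q :: t => pvLast (cur ++ '/' :: q) t

theorem pvSplit1_ne_nil (l : List Char) : pvSplit1 l ≠ [] := by
  induction l with
  | nil => simp [pvSplit1]
  | cons c t ih =>
    simp only [pvSplit1]
    split
    · simp
    · cases h : pvSplit1 t <;> simp

theorem pv_splitOn_go_eq (fuel : Nat) : ∀ (l cur : List Char) (acc : List (List Char)),
    l.length ≤ fuel →
    PySem.Chars.splitOn.go ['.'] fuel l cur acc = acc.reverse ++ pvConsH cur.reverse (pvSplit1 l) := by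
  induction fuel with
  | zero =>
    intro l cur acc h
    have : l = [] := by cases l <;> simp_all
    subst this
    simp [PySem.Chars.splitOn.go, pvSplit1, pvConsH]
  | succ fuel ih =>
    intro l cur acc h
    cases l with
    | nil => simp [PySem.Chars.splitOn.go, pvSplit1, pvConsH]
    | cons c rest =>
      by_cases hc : c = '.'
      · subst hc
        rw [PySem.Chars.splitOn.go]
        simp only [List.isPrefixOf, BEq.rfl, Bool.true_and, if_pos, List.length_cons,
          List.length_nil, Nat.zero_add, List.drop_succ_cons, List.drop_zero]
        rw [ih rest [] (cur.reverse :: acc) (by simpa using h)]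
        cases hsp : pvSplit1 rest with
        | nil => exact absurd hsp (pvSplit1_ne_nil rest)
        | cons p ps => simp [pvSplit1, hsp, pvConsH]
      · rw [PySem.Chars.splitOn.go]
        have hpre : (['.'].isPrefixOf (c :: rest)) = false := by
          simp [List.isPrefixOf]; intro hx; exact absurd hx.symm hc
        rw [if_neg (by simp [hpre])]
        rw [ih rest (c :: cur) acc (by simpa using h)]
        simp only [pvSplit1, if_neg hc, List.reverse_cons]
        cases hsp : pvSplit1 rest with
        | nil => simp [pvConsH]
        | cons p ps => simp [pvConsH]

theorem pv_splitOn_eq (l : List Char) : PySem.Chars.splitOn l ['.'] = pvSplit1 l := by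
  rw [PySem.Chars.splitOn, pv_splitOn_go_eq (l.length + 1) l [] [] (by omega)]
  cases h : pvSplit1 l with
  | nil => exact absurd h (pvSplit1_ne_nil l)
  | cons p ps => simp [pvConsH]

theorem pv_replace_go_eq (fuel : Nat) : ∀ (l acc : List Char),
    l.length ≤ fuel →
    PySem.Chars.replace.go ['.'] ['/'] fuel l acc = acc.reverse ++ l.map pvF := by
  induction fuel with
  | zero =>
    intro l acc h
    have : l = [] := by cases l <;> simp_all
    subst this; simp [PySem.Chars.replace.go]
  | succ fuel ih =>
    intro l acc h
    cases l with
    | nil => simp [PySem.Chars.replace.go]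
    | cons c t =>
      by_cases hc : c = '.'
      · subst hc
        rw [PySem.Chars.replace.go]
        simp only [List.isPrefixOf, BEq.rfl, Bool.true_and, if_pos, List.length_cons,
          List.length_nil, Nat.zero_add, List.drop_succ_cons, List.drop_zero]
        rw [ih t _ (by simpa using h)]
        simp [pvF]
      · rw [PySem.Chars.replace.go]
        have hpre : (['.'].isPrefixOf (c :: t)) = false := by
          simp [List.isPrefixOf]; intro hx; exact absurd hx.symm hc
        rw [if_neg (by simp [hpre])]
        rw [ih t _ (by simpa using h)]
        simp [pvF, hc]

theorem pv_replace_eq (l : List Char) : PySem.Chars.replace l ['.'] ['/'] = l.map pvF := by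
  rw [PySem.Chars.replace]
  simp only [List.isEmpty_cons]
  exact pv_replace_go_eq l.length l [] (le_refl _)

theorem pv_join_eq (sep : Char) (ps : List (List Char)) :
    PySem.Chars.join [sep] ps = pvJoin sep ps := by
  induction ps with
  | nil => simp [PySem.Chars.join, pvJoin, List.intercalate]
  | cons p t ih =>
    cases t with
    | nil => simp [PySem.Chars.join, pvJoin, List.intercalate]
    | cons q u =>
      simp only [PySem.Chars.join, List.intercalate] at ih ⊢
      rw [List.intersperse_cons₂, List.flatten_cons, List.flatten_cons]
      simp only [pvJoin, List.flatMap_cons] at ih ⊢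
      rw [show ([sep] ++ List.flatten (List.intersperse [sep] (q :: u))) =
        [sep] ++ (List.intersperse [sep] (q :: u)).flatten from rfl]
      simp [ih]

theorem pv_flatMap_of_ne_nil (sep : Char) (s : List (List Char)) (h : s ≠ []) :
    s.flatMap (fun q => sep :: q) = sep :: pvJoin sep s := by
  cases s with
  | nil => exact absurd rfl h
  | cons p ps => simp [pvJoin]

theorem pv_join_split1 (l : List Char) : pvJoin '.' (pvSplit1 l) = l := by
  induction l with
  | nil => simp [pvSplit1, pvJoin]
  | cons c t ih =>
    by_cases hc : c = '.'
    · subst hc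
      rw [show pvSplit1 ('.' :: t) = [] :: pvSplit1 t from by simp [pvSplit1]]
      simp only [pvJoin, List.nil_append]
      rw [pv_flatMap_of_ne_nil _ _ (pvSplit1_ne_nil t), ih]
    · simp only [pvSplit1, if_neg hc]
      cases hsp : pvSplit1 t with
      | nil => exact absurd hsp (pvSplit1_ne_nil t)
      | cons p ps =>
        rw [hsp] at ih
        simp only [pvJoin, List.cons_append] at ih ⊢
        rw [ih]

theorem pv_split1_free (l : List Char) : ∀ p ∈ pvSplit1 l, '.' ∉ p := by
  induction l with
  | nil => simp [pvSplit1]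
  | cons c t ih =>
    by_cases hc : c = '.'
    · subst hc
      rw [show pvSplit1 ('.' :: t) = [] :: pvSplit1 t from by simp [pvSplit1]]
      intro p hp
      rcases List.mem_cons.mp hp with h | h
      · subst h; simp
      · exact ih p h
    · simp only [pvSplit1, if_neg hc]
      cases hsp : pvSplit1 t with
      | nil => exact absurd hsp (pvSplit1_ne_nil t)
      | cons q ps =>
        rw [hsp] at ih
        intro p hp
        rcases List.mem_cons.mp hp with h | h
        · subst h
          intro hmem
          rcases List.mem_cons.mp hmem with h | h
          · exact hc h.symm
          · exact ih q (by simp) h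
        · exact ih p (List.mem_cons_of_mem _ h)

theorem pv_map_free (p : List Char) (h : '.' ∉ p) : p.map pvF = p := by
  induction p with
  | nil => simp
  | cons c t ih =>
    simp only [List.mem_cons, not_or] at h
    simp only [List.map_cons, pvF, if_neg (fun hx : c = '.' => h.1 hx.symm), ih h.2]

theorem pv_map_pvF_join (ps : List (List Char)) (h : ∀ p ∈ ps, '.' ∉ p) :
    (pvJoin '.' ps).map pvF = pvJoin '/' ps := by
  cases ps with
  | nil => simp [pvJoin]
  | cons p t =>
    simp only [pvJoin, List.map_append]
    rw [pv_map_free p (h p (by simp))]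
    congr 1
    induction t with
    | nil => simp
    | cons q u ihu =>
      simp only [List.flatMap_cons, List.map_append, List.map_cons]
      rw [show pvF '.' = '/' from rfl,
        pv_map_free q (h q (by simp)),
        ihu (fun r hr => h r (by
          rcases List.mem_cons.mp hr with h1 | h1
          · simp [h1]
          · exact List.mem_cons_of_mem _ (List.mem_cons_of_mem _ h1)))]

theorem pv_scan_spec (qs : List (List Char)) : ∀ cur,
    pvScan cur qs = (List.range qs.length).map
      (fun j => cur ++ (qs.take (j + 1)).flatMap (fun q => '/' :: q)) := by
  induction qs with
  | nil => intro cur; simp [pvScan]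
  | cons q t ih =>
    intro cur
    simp only [pvScan, List.length_cons, List.range_succ_eq_map, List.map_cons, List.map_map]
    congr 1
    · simp
    · rw [ih (cur ++ '/' :: q)]
      apply List.map_congr_left
      intro j hj
      simp [List.flatMap_cons]

theorem pv_chain_eq (ps : List (List Char)) (h : ps ≠ []) :
    pvChain ps = (List.range ps.length).map (fun j => pvJoin '/' (ps.take (j + 1))) := by
  cases ps with
  | nil => exact absurd rfl h
  | cons p t =>
    simp only [pvChain, List.length_cons, List.range_succ_eq_map, List.map_cons, List.map_map]
    congr 1
    · simp [pvJoin]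
    · rw [pv_scan_spec t p]
      apply List.map_congr_left
      intro j hj
      simp [pvJoin]

theorem pv_rev_range_take (m : Nat) :
    ((List.range (m + 3)).reverse).take 3 = [m + 2, m + 1, m] := by
  rw [List.range_succ, List.range_succ, List.range_succ]
  simp

theorem pv_chain_thm (ps : List (List Char)) (h : ps ≠ []) :
    pvJoin '/' ps :: (PySem.List.pyRange ((ps.length : Int) - 1) (max 0 ((ps.length : Int) - 3)) (-1)).map
        (fun i => pvJoin '/' (ps.take i.toNat))
      = ((pvChain ps).reverse).take 3 := by
  match ps, h with
  | [p], _ =>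
    simp only [List.length_cons, List.length_nil]
    rw [show ((0 + 1 : Nat) : Int) - 1 = 0 by norm_num,
        show max 0 (((0 + 1 : Nat) : Int) - 3) = 0 by norm_num,
        PySem.List.pyRange_neg_one_eq_nil (by norm_num)]
    simp [pvChain, pvScan, pvJoin]
  | [p, q], _ =>
    rw [show ((([p, q] : List (List Char)).length : Int) - 1) = 1 by simp,
        show max 0 ((([p, q] : List (List Char)).length : Int) - 3) = 0 by simp,
        PySem.List.pyRange_neg_one_cons (by norm_num),
        PySem.List.pyRange_neg_one_eq_nil (by norm_num)]
    simp [pvChain, pvScan, pvJoin]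
  | p :: q :: r :: t, _ =>
    have hn : (p :: q :: r :: t).length = t.length + 3 := by simp
    rw [hn]
    have h1 : ((t.length + 3 : Nat) : Int) - 1 = ((t.length + 2 : Nat) : Int) := by push_cast; ring
    have h3 : max 0 (((t.length + 3 : Nat) : Int) - 3) = ((t.length : Nat) : Int) := by
      push_cast; omega
    rw [h1, h3,
        PySem.List.pyRange_neg_one_cons (by push_cast; omega),
        show ((t.length + 2 : Nat) : Int) - 1 = ((t.length + 1 : Nat) : Int) by push_cast; ring,
        PySem.List.pyRange_neg_one_cons (by push_cast; omega),
        show ((t.length + 1 : Nat) : Int) - 1 = ((t.length : Nat) : Int) by push_cast; ring,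
        PySem.List.pyRange_neg_one_eq_nil (le_refl _)]
    rw [pv_chain_eq _ (by simp), hn, List.map_reverse.symm, ← List.map_take,
pv_rev_range_take]
    simp only [List.map_cons, List.map_nil, Int.toNat_natCast]
    rw [show t.length + 2 + 1 = t.length + 3 from rfl,
        List.take_of_length_le (l := p :: q :: r :: t) (i := t.length + 3) (by simp)]

-- Str.join "/" [a, b] at char level
theorem pv_str_join2 (a b : List Char) :
    PySem.Str.join "/" [String.ofList a, String.ofList b] = String.ofList (a ++ '/' :: b) := by
  rw [PySem.Str.join]
  congr 1
  rw [show ("/" : String).toList = ['/'] from rfl]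
  simp only [List.map_cons, List.map_nil, String.toList_ofList]
  rw [pv_join_eq]
  simp [pvJoin]

theorem pv_fold_eq (qs : List (List Char)) : ∀ (ch : List String) (curC : List Char), ch ≠ [] →
    (qs.map String.ofList).foldl
      (fun (st : List String × String) part =>
        let cur := if st.1.isEmpty then part else PySem.Str.join "/" [st.2, part]
        (st.1 ++ [cur], cur)) (ch, String.ofList curC)
    = (ch ++ (pvScan curC qs).map String.ofList, String.ofList (pvLast curC qs)) := by
  induction qs with
  | nil => intro ch curC h; simp [pvScan, pvLast]
  | cons q t ih =>
    intro ch curC h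
    simp only [List.map_cons, List.foldl_cons]
    rw [show ch.isEmpty = false by simp [h]]
    simp only [Bool.false_eq_true, if_false]
    rw [pv_str_join2 curC q]
    rw [ih (ch ++ [String.ofList (curC ++ '/' :: q)]) (curC ++ '/' :: q) (by simp)]
    simp [pvScan, pvLast]

theorem pv_str_join_gen (l : List (List Char)) :
    PySem.Str.join "." (l.map String.ofList) = String.ofList (pvJoin '.' l) := by
  rw [PySem.Str.join, show ("." : String).toList = ['.'] from rfl]
  congr 1
  rw [List.map_map, show (String.toList ∘ String.ofList) = id from funext (fun x => String.toList_ofList (l := x)),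
      List.map_id, pv_join_eq]

theorem pv_str_replace_eq (s : String) :
    PySem.Str.replace s "." "/" = String.ofList ((s.toList).map pvF) := by
  rw [PySem.Str.replace, show ("." : String).toList = ['.'] from rfl,
      show ("/" : String).toList = ['/'] from rfl, pv_replace_eq]

theorem pv_ports_agree (group_id : String) :
    extract_group_id_prefixes_py group_id = extract_group_id_prefixes_py_alt group_id := by
  by_cases hg : group_id = ""
  · simp [extract_group_id_prefixes_py, extract_group_id_prefixes_py_alt, hg]
  · have hcs : group_id.toList ≠ [] := by
      intro h
      exact hg (String.toList_inj.mp (by simp [h]))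
    rw [extract_group_id_prefixes_py, extract_group_id_prefixes_py_alt, if_neg hg, if_neg hg]
    simp only [pv_splitOn_eq]
    set ps := pvSplit1 group_id.toList with hps
    -- A side
    rw [PySem.List.foldl_append_singleton_eq_map
      (fun i => PySem.Str.replace (PySem.Str.join "."
        (PySem.List.slice (ps.map String.ofList) none (some i))) "." "/")]
    simp only [List.length_map]
    have hne : ps ≠ [] := pvSplit1_ne_nil _
    have hfree : ∀ p ∈ ps, '.' ∉ p := pv_split1_free _
    -- head of A
    have hhead : PySem.Str.replace group_id "." "/" = String.ofList (pvJoin '/' ps) := by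
      rw [pv_str_replace_eq, show group_id.toList = pvJoin '.' ps from (pv_join_split1 _).symm,
          pv_map_pvF_join ps hfree]
    -- tail of A
    have htail : (PySem.List.pyRange ((ps.length : Int) - 1) (max 0 ((ps.length : Int) - 3)) (-1)).map
        (fun i => PySem.Str.replace (PySem.Str.join "."
          (PySem.List.slice (ps.map String.ofList) none (some i))) "." "/")
        = (PySem.List.pyRange ((ps.length : Int) - 1) (max 0 ((ps.length : Int) - 3)) (-1)).map
          (fun i => String.ofList (pvJoin '/' (ps.take i.toNat))) := by
      apply List.map_congr_left
      intro i hi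
      have h0i : 0 ≤ i := by
        have := (PySem.List.mem_pyRange_neg_one.mp hi).1
        calc (0 : Int) ≤ max 0 ((ps.length : Int) - 3) := le_max_left _ _
          _ ≤ i := le_of_lt this
      rw [PySem.List.slice_to _ h0i, ← List.map_take, pv_str_join_gen, pv_str_replace_eq,
          String.toList_ofList,
          pv_map_pvF_join _ (fun p hp => hfree p (List.mem_of_mem_take hp))]
    rw [List.singleton_append, hhead, htail,
        show (String.ofList (pvJoin '/' ps) :: (PySem.List.pyRange ((ps.length : Int) - 1)
          (max 0 ((ps.length : Int) - 3)) (-1)).map (fun i => String.ofList (pvJoin '/' (ps.take i.toNat))))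
          = (pvJoin '/' ps :: (PySem.List.pyRange ((ps.length : Int) - 1)
            (max 0 ((ps.length : Int) - 3)) (-1)).map (fun i => pvJoin '/' (ps.take i.toNat))).map String.ofList
          from by simp [List.map_map],
        pv_chain_thm ps hne]
    -- B side
    cases hps' : ps with
    | nil => exact absurd hps' hne
    | cons p tl =>
      simp only [List.map_cons, List.foldl_cons, List.isEmpty_nil, if_pos, List.nil_append]
      rw [pv_fold_eq tl [String.ofList p] p (by simp)]
      simp [pvChain, List.map_reverse, List.map_take]

-- ===== VERDICT (by name: the statement is the Claim_ definition above) =====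
theorem extract_group_id_prefixes_py_spec : Claim_equal_extract_group_id_prefixes_py := by
  intro group_id _
  unfold Spec_extract_group_id_prefixes_py
  exact pv_ports_agree group_id
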